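-- pv_equiv track=rewrite | github.com/jackdeadman/advent-of-code-2024 | 04/b.py | make_templates
-- ===== SOURCE A (Python) =====
-- SENTINEL = ' '
--
-- def reflect(matrix: list[list[str]]) -> list[list[str]]:
--     n = len(matrix)
--     new_matrix = [[' ' for _ in range(n)] for _ in range(n)]
--
--     for i in range(n):
--         for j in range(n):
--             new_matrix[i][j] = matrix[j][i]
--
--     return new_matrix
--
-- def make_templates(x: str) -> list[list[list[str]]]:
--
--     def __make_template(x: str) -> list[list[str]]:
--         n = len(x)
--         kernel = [[SENTINEL for _ in range(n)] for _ in range(n)]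
--
--         for i in range(n):
--             kernel[i][i] = x[i]
--             kernel[i][-i - 1] = x[i]
--
--         return kernel
--
--     base = __make_template(x)
--     base_reversed = __make_template(x[::-1])
--
--     templates = [
--         base,
--         base_reversed,
--         reflect(base),
--         reflect(base_reversed),
--     ]
--
--     return templates
-- ===== SOURCE B (Python) =====
-- SENTINEL = ' '
--
-- def make_templates(x: str) -> list[list[list[str]]]:
--     n = len(x)
--     r = x[::-1]
--
--     def place(d: str, a: str) -> list[list[str]]:
--         # direct construction: d goes on the main diagonal, a on the anti-diagonal
--         return [[a[i] if j == n - 1 - i else (d[i] if j == i else SENTINEL)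
--                  for j in range(n)]
--                 for i in range(n)]
--
--     return [place(x, x), place(r, r), place(x, r), place(r, x)]
-- ===== Notes on version B (the rewrite author's own statement) =====
-- stated objective: simpler
-- what changed: B builds all four templates by one direct comprehension placing d[i] on the main diagonal and a[i] on the anti-diagonal, choosing (d,a) among (x,reversed x), eliminating A's mutation loops, the __make_template helper and the reflect() transpose pass.
import Mathlib
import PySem

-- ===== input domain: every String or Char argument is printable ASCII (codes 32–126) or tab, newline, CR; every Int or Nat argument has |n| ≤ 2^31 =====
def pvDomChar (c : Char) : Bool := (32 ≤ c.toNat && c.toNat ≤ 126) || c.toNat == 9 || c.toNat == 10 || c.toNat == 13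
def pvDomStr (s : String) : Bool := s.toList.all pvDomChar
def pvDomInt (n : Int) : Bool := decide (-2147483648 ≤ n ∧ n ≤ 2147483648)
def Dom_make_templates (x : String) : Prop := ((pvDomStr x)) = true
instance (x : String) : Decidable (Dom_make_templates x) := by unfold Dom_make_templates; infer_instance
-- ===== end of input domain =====

-- B replaces A's build-two-then-transpose scheme by one direct diagonal-placement
-- comprehension for each of the four templates (objective: simpler).

-- ===== PORT A =====
-- kernel[i][j] = c  (row i exists since i < len(kernel); assignment = functional update)
def pvSet2 (k : List (List String)) (i j : Nat) (c : String) : List (List String) :=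
  k.modify i (fun row => row.set j c)

-- __make_template: kernel[i][-i-1]: since 0 ≤ i < n, Python's negative index wraps to n-i-1; exact here.
def pvMakeTemplate (x : List Char) : List (List String) :=
  let n := x.length
  (List.range n).foldl
    (fun kernel i =>
      let c := String.ofList [x.getD i ' ']   -- x[i], always in range for i < n
      pvSet2 (pvSet2 kernel i i c) i (n - i - 1) c)
    (List.replicate n (List.replicate n " "))

-- reflect: new_matrix[i][j] = matrix[j][i]; both indices < n = len(matrix), so getD defaults are unreachable.
def pvReflect (m : List (List String)) : List (List String) :=
  let n := m.length
  (List.range n).foldl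
    (fun nm i =>
      (List.range n).foldl
        (fun nm j => pvSet2 nm i j ((m.getD j []).getD i " ")) nm)
    (List.replicate n (List.replicate n " "))

def make_templates (x : String) : List (List (List String)) :=
  let base := pvMakeTemplate x.toList
  let base_reversed := pvMakeTemplate x.toList.reverse   -- x[::-1]
  [base, base_reversed, pvReflect base, pvReflect base_reversed]

-- ===== PORT B =====
-- place(d, a): row i, column j gets a[i] on the anti-diagonal, d[i] on the main diagonal, ' ' elsewhere.
def pvPlace (n : Nat) (d a : List Char) : List (List String) :=
  (List.range n).map (fun i =>
    (List.range n).map (fun j =>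
      if j = n - 1 - i then String.ofList [a.getD i ' ']
      else if j = i then String.ofList [d.getD i ' ']
      else " "))

def make_templates_alt (x : String) : List (List (List String)) :=
  let n := x.toList.length
  let xs := x.toList
  let rs := xs.reverse                                   -- x[::-1]
  [pvPlace n xs xs, pvPlace n rs rs, pvPlace n xs rs, pvPlace n rs xs]

-- ===== PRECONDITION & SPEC =====
def Spec_make_templates (x : String) (out : List (List (List String))) : Prop := out = make_templates_alt x
instance (x : String) (out : List (List (List String))) : Decidable (Spec_make_templates x out) := by unfold Spec_make_templates; infer_instance

-- ===== CLAIM (what is proved, stated in full; the proofs are below) =====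
def Claim_equal_make_templates : Prop := ∀ (x : String), Dom_make_templates x → Spec_make_templates x (make_templates x)

-- ===== LEMMAS AND PROOFS =====

-- two modifications of the same row collapse into one
theorem pv_modify_modify {α : Type} (l : List α) (i : Nat) (f g : α → α) :
    (l.modify i f).modify i g = l.modify i (fun a => g (f a)) := by
  apply List.ext_getElem?
  intro j
  simp only [List.getElem?_modify]
  cases l[j]? with
  | none => simp
  | some a => by_cases h : i = j <;> simp [h]

-- a fold of per-index row updates over range n, read back at index j
theorem pv_foldl_range_modify {α : Type} (f : Nat → α → α) :
    ∀ (n : Nat) (init : List α) (j : Nat),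
      ((List.range n).foldl (fun k i => k.modify i (f i)) init)[j]? =
        if j < n then (f j) <$> init[j]? else init[j]? := by
  intro n
  induction n with
  | zero => intro init j; simp
  | succ n ih =>
    intro init j
    rw [List.range_succ, List.foldl_append]
    simp only [List.foldl_cons, List.foldl_nil]
    rw [List.getElem?_modify, ih]
    rcases Nat.lt_trichotomy j n with h | h | h
    · have h1 : j < n + 1 := by omega
      have h2 : n ≠ j := by omega
      cases init[j]? <;> simp [h, h1, h2]
    · subst h
      cases init[j]? <;> simp
    · have h1 : ¬ j < n := by omega
      have h2 : ¬ j < n + 1 := by omega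
      have h3 : n ≠ j := by omega
      cases init[j]? <;> simp [h1, h2, h3]

-- a fold of sets over range n preserves length
theorem pv_foldl_range_set_length {α : Type} (h : Nat → α) :
    ∀ (n : Nat) (init : List α),
      ((List.range n).foldl (fun r i => r.set i (h i)) init).length = init.length := by
  intro n
  induction n with
  | zero => intro init; simp
  | succ n ih =>
    intro init
    rw [List.range_succ, List.foldl_append]
    simp [ih]

-- a fold of sets over range n, read back at index j
theorem pv_foldl_range_set {α : Type} (h : Nat → α) :
    ∀ (n : Nat) (init : List α) (j : Nat),
      ((List.range n).foldl (fun r i => r.set i (h i)) init)[j]? =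
        if j < n ∧ j < init.length then some (h j) else init[j]? := by
  intro n
  induction n with
  | zero => intro init j; simp
  | succ n ih =>
    intro init j
    rw [List.range_succ, List.foldl_append]
    simp only [List.foldl_cons, List.foldl_nil]
    rw [List.getElem?_set, pv_foldl_range_set_length, ih]
    by_cases hj : n = j
    · subst hj
      by_cases hl : n < init.length
      · simp [hl, Nat.lt_irrefl, Nat.lt_succ_self]
      · simp [hl, Nat.lt_irrefl]
    · by_cases hlt : j < n
      · have : j < n + 1 := Nat.lt_succ_of_lt hlt
        simp [hj, hlt, this]
      · have : j < n + 1 ↔ j = n := by omega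
        simp [hj, hlt, this]
        intro hje; exact absurd hje.symm hj

-- a fold of modifications all targeting row i collapses to one modification of row i
theorem pv_foldl_modify_same {α : Type} (g : Nat → α → α) (i : Nat) :
    ∀ (n : Nat) (nm : List α),
      (List.range n).foldl (fun nm j => nm.modify i (g j)) nm =
        nm.modify i (fun row => (List.range n).foldl (fun r j => g j r) row) := by
  intro n
  induction n with
  | zero =>
    intro nm
    simp only [List.range_zero, List.foldl_nil]
    apply List.ext_getElem?
    intro j
    rw [List.getElem?_modify]
    cases nm[j]? <;> simp
  | succ n ih =>
    intro nm
    rw [List.range_succ, List.foldl_append]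
    simp only [List.foldl_cons, List.foldl_nil]
    rw [ih, pv_modify_modify]
    congr 1
    funext row
    rw [List.foldl_append]
    simp

-- characterization of A's __make_template at row i
theorem pv_makeTemplate_row (x : List Char) (i : Nat) :
    (pvMakeTemplate x)[i]? =
      if i < x.length then
        some ((((List.replicate x.length " ").set i (String.ofList [x.getD i ' '])).set
          (x.length - i - 1) (String.ofList [x.getD i ' ']))) else none := by
  unfold pvMakeTemplate pvSet2
  simp only [pv_modify_modify]
  rw [pv_foldl_range_modify]
  by_cases h : i < x.length <;> simp [h, List.getElem?_replicate]

-- characterization of reflect at cell (i, j), for a square input of side n := m.length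
-- characterization of A's reflect at row i (as the fold of per-cell sets)
theorem pv_reflect_row (m : List (List String)) (i : Nat) :
    (pvReflect m)[i]? =
      if i < m.length then
        some ((List.range m.length).foldl
          (fun r j => r.set j ((m.getD j []).getD i " "))
          (List.replicate m.length " ")) else none := by
  unfold pvReflect pvSet2
  simp only [pv_foldl_modify_same, pv_foldl_range_modify]
  by_cases hi : i < m.length <;> simp [hi, List.getElem?_replicate]

-- base (and base_reversed) equal B's direct placement with d = a
theorem pv_base_eq (y : List Char) : pvMakeTemplate y = pvPlace y.length y y := by
  apply List.ext_getElem?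
  intro i
  rw [pv_makeTemplate_row]
  by_cases hi : i < y.length
  · simp only [hi, if_true, pvPlace, List.getElem?_map, List.getElem?_range, Option.map_some]
    congr 1
    apply List.ext_getElem?
    intro j
    rw [List.getElem?_set, List.getElem?_set]
    simp only [List.length_set, List.length_replicate, List.getElem?_map, List.getElem?_range,
      List.getElem?_replicate]
    by_cases hj : j < y.length
    · have hb : y.length - i - 1 < y.length := by omega
      simp only [hj, hb, hi, if_true, Option.map_some]
      have hb2 : y.length - 1 - i < y.length := by omega
      by_cases h1 : y.length - i - 1 = j
      · have h1' : j = y.length - 1 - i := by omega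
        simp [h1, h1', List.getElem?_range, hb2]
      · have h1' : ¬ j = y.length - 1 - i := by omega
        by_cases h2 : i = j
        · subst h2; simp [h1, h1', List.getElem?_range, hj]
        · have h2' : ¬ j = i := fun h => h2 h.symm
          simp [h1, h1', h2, h2', List.getElem?_range, hj]
    · have h1 : y.length - i - 1 ≠ j := by omega
      have h2 : i ≠ j := by omega
      simp [hj, h1, h2]
  · simp [hi, pvPlace, List.getElem?_map, List.getElem?_range]

-- reflect(base) equals B's direct placement with d = y, a = reversed y
theorem pv_reflect_base_eq (y : List Char) :
    pvReflect (pvMakeTemplate y) = pvPlace y.length y y.reverse := by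
  rw [pv_base_eq]
  have hlen : (pvPlace y.length y y).length = y.length := by
    simp [pvPlace]
  apply List.ext_getElem?
  intro i
  rw [pv_reflect_row, hlen]
  by_cases hi : i < y.length
  · simp only [hi, if_true, pvPlace, List.getElem?_map, List.getElem?_range, Option.map_some]
    congr 1
    apply List.ext_getElem?
    intro j
    rw [pv_foldl_range_set]
    simp only [List.length_replicate, List.getElem?_map, List.getElem?_range,
      List.getElem?_replicate, List.getD, List.getD_eq_getElem?_getD]
    by_cases hj : j < y.length
    · have hrev : y.reverse[i]? = y[y.length - 1 - i]? :=
        List.getElem?_reverse (by simpa using hi)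
      simp only [hj, hi, and_self, if_true, List.getElem?_map, List.getElem?_range,
        Option.map_some, Option.getD_some, hrev]
      by_cases h1 : j = y.length - 1 - i
      · subst h1
        have h1' : i = y.length - 1 - (y.length - 1 - i) := by omega
        simp [← h1']
      · have h1' : ¬ i = y.length - 1 - j := by omega
        by_cases h2 : j = i
        · subst h2
          simp [h1, h1']
        · simp [h1, h1', h2, Ne.symm h2]
    · simp [hj]
  · simp [hi, pvPlace, List.getElem?_map, List.getElem?_range]

theorem make_templates_spec : Claim_equal_make_templates := by
  intro x _
  unfold Spec_make_templates
  have h3 := pv_reflect_base_eq x.toList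
  have h4 := pv_reflect_base_eq x.toList.reverse
  rw [List.reverse_reverse, List.length_reverse] at h4
  have h2 := pv_base_eq x.toList.reverse
  rw [List.length_reverse] at h2
  simp only [make_templates, make_templates_alt]
  rw [h3, h4, pv_base_eq x.toList, h2]
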